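-- pv_equiv track=rewrite | github.com/chkp-dmorris/AWS-local-zone | template/cluster/aws_had.py | _get_remains_ips_with_and_without_eips
-- ===== SOURCE A (Python) =====
-- def _get_remains_ips_with_and_without_eips(remain_ips, secondary_ips_with_eip):
--     """
--     input: remain_ips: List of IPs that are not paired, secondary_ips_with_eip: Dictionary of IPs that have EIPs
--     return: return list of non-paired IPs without EIPs, dictionary of non-paired IPs as keys with EIPs as value
--     Note: This is called only for Cross AZ Cluster
--     """
--     remain_without_eip = []
--     remain_with_eip = {}
--     for ip in remain_ips:
--         if ip in secondary_ips_with_eip.keys():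
--             remain_with_eip[ip] = secondary_ips_with_eip[ip]
--         else:
--             remain_without_eip.append(ip)
--     remain_without_eip.sort()
--     return remain_without_eip, dict(sorted(remain_with_eip.items()))
-- ===== SOURCE B (Python) =====
-- def _get_remains_ips_with_and_without_eips(remain_ips, secondary_ips_with_eip):
--     """Two independent staged passes instead of one partition loop: the list is
--     sorted(remaining IPs absent from the EIP map); the dict is built by walking
--     the EIP map's sorted items and keeping those whose key is a remaining IP
--     (set membership), so its keys land in sorted order with no trailing sort."""
--     remain_set = set(remain_ips)
--     remain_without_eip = sorted(ip for ip in remain_ips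
--                                 if ip not in secondary_ips_with_eip)
--     remain_with_eip = {ip: eip for ip, eip in sorted(secondary_ips_with_eip.items())
--                        if ip in remain_set}
--     return remain_without_eip, remain_with_eip
-- ===== Notes on version B (the rewrite author's own statement) =====
-- stated objective: alternative
-- what changed: A loops over remain_ips partitioning by dict membership and then sorts both results; B builds each result independently: the list as sorted(remain_ips filtered by non-membership), and the dict by iterating the sorted items of the EIP map itself and keeping keys that are remaining IPs, so no partition loop and no trailing sorts.
import Mathlib
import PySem

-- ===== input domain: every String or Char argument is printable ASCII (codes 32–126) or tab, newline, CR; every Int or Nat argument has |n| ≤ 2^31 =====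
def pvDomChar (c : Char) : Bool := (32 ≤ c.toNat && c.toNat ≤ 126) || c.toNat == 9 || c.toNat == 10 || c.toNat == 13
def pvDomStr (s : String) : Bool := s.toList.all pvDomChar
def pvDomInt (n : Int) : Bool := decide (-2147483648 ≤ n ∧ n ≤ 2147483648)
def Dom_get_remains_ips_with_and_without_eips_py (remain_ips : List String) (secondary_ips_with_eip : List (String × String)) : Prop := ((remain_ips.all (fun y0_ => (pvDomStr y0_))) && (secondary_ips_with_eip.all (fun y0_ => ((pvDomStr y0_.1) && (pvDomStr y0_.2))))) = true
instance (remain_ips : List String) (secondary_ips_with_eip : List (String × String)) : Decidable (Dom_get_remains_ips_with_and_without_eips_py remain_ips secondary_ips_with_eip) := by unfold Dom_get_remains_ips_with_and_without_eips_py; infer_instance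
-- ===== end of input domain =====

-- B builds the two results by independent staged passes (the dict by walking the EIP map's sorted items)
-- instead of A's partition-then-sort-twice loop; objective: alternative. Return value only; neither mutates its arguments.

-- ===== PORT A =====
-- A: partition remain_ips by membership in the dict's keys, then sort the list and sort the dict's items.
def get_remains_ips_with_and_without_eips_py (remain_ips : List String) (secondary_ips_with_eip : List (String × String)) : List String × (List (String × String)) :=
  let d := PySem.Dict.mk secondary_ips_with_eip
  let acc := remain_ips.foldl
    (fun acc ip =>
      if d.contains ip then
        -- 'remain_with_eip[ip] = secondary_ips_with_eip[ip]': lookup guarded by the membership test, so getD is exact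
        (acc.1, acc.2.insert ip (d.getD ip ""))
      else
        (acc.1 ++ [ip], acc.2))
    ([], PySem.Dict.empty)
  (PySem.List.sorted acc.1 (fun x => x) false,
   (PySem.Dict.ofList (PySem.List.sorted2 acc.2.items (fun p => p.1) (fun p => p.2) false)).items)

-- ===== PORT B =====
-- B: list = sorted(remain_ips filtered by non-membership); dict = a dict comprehension over
-- sorted(secondary_ips_with_eip.items()) keeping keys that are in set(remain_ips).
def get_remains_ips_with_and_without_eips_py_alt (remain_ips : List String) (secondary_ips_with_eip : List (String × String)) : List String × (List (String × String)) :=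
  let remain_set : PySem.Set String := PySem.Set.ofList remain_ips
  let remain_without_eip :=
    PySem.List.sorted (remain_ips.filter (fun ip => !(PySem.Dict.mk secondary_ips_with_eip).contains ip)) (fun x => x) false
  let remain_with_eip :=
    ((PySem.List.sorted2 secondary_ips_with_eip (fun p => p.1) (fun p => p.2) false).filter
        (fun p => PySem.Set.contains remain_set p.1)).foldl
      (fun acc p => acc.insert p.1 p.2) PySem.Dict.empty
  (remain_without_eip, remain_with_eip.items)

-- ===== PRECONDITION & SPEC =====
-- Pre_ excludes association lists with a duplicated key: such a list represents no Python dict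
-- (the parameter is a dict in Python), so neither side's behaviour there is specified.
def Pre_get_remains_ips_with_and_without_eips_py (remain_ips : List String) (secondary_ips_with_eip : List (String × String)) : Prop :=
  (secondary_ips_with_eip.map Prod.fst).Nodup
instance (remain_ips : List String) (secondary_ips_with_eip : List (String × String)) : Decidable (Pre_get_remains_ips_with_and_without_eips_py remain_ips secondary_ips_with_eip) := by unfold Pre_get_remains_ips_with_and_without_eips_py; infer_instance

def pvWitness_get_remains_ips_with_and_without_eips_py : List String × (List (String × String)) :=
  (["10.0.0.2", "10.0.0.1", "10.0.0.2"], [("10.0.0.1", "eip1"), ("10.0.0.9", "eip9")])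

def Spec_get_remains_ips_with_and_without_eips_py (remain_ips : List String) (secondary_ips_with_eip : List (String × String)) (out : List String × (List (String × String))) : Prop := out = get_remains_ips_with_and_without_eips_py_alt remain_ips secondary_ips_with_eip
instance (remain_ips : List String) (secondary_ips_with_eip : List (String × String)) (out : List String × (List (String × String))) : Decidable (Spec_get_remains_ips_with_and_without_eips_py remain_ips secondary_ips_with_eip out) := by unfold Spec_get_remains_ips_with_and_without_eips_py; infer_instance

-- ===== CLAIM (what is proved, stated in full; the proofs are below) =====
def Claim_equal_get_remains_ips_with_and_without_eips_py : Prop := ∀ (remain_ips : List String) (secondary_ips_with_eip : List (String × String)), Dom_get_remains_ips_with_and_without_eips_py remain_ips secondary_ips_with_eip → Pre_get_remains_ips_with_and_without_eips_py remain_ips secondary_ips_with_eip → Spec_get_remains_ips_with_and_without_eips_py remain_ips secondary_ips_with_eip (get_remains_ips_with_and_without_eips_py remain_ips secondary_ips_with_eip)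

-- ===== LEMMAS AND PROOFS =====

-- the dict-building loop of A, factored for the proofs
def pvIns (d : PySem.Dict String String) (ks : List String) (dd : PySem.Dict String String) : PySem.Dict String String :=
  ks.foldl (fun dd k => dd.insert k (d.getD k "")) dd

-- A's fold, characterized: list part = kept-out IPs in order; dict part = inserts over the kept-in IPs
theorem pv_foldA (d : PySem.Dict String String) :
    ∀ (rem : List String) (l0 : List String) (dd : PySem.Dict String String),
      rem.foldl
        (fun acc ip =>
          if d.contains ip then (acc.1, acc.2.insert ip (d.getD ip ""))
          else (acc.1 ++ [ip], acc.2))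
        (l0, dd)
      = (l0 ++ rem.filter (fun ip => !d.contains ip),
         pvIns d (rem.filter (fun ip => d.contains ip)) dd) := by
  intro rem
  induction rem with
  | nil => intro l0 dd; simp [pvIns]
  | cons x xs ih =>
    intro l0 dd
    by_cases h : d.contains x = true
    · simp [List.foldl_cons, h, ih, pvIns]
    · simp only [Bool.not_eq_true] at h
      simp [List.foldl_cons, h, ih, pvIns]

theorem pv_get?_pvIns (d : PySem.Dict String String) :
    ∀ (ks : List String) (dd : PySem.Dict String String) (x : String),
      (pvIns d ks dd).get? x = if x ∈ ks then some (d.getD x "") else dd.get? x := by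
  intro ks
  induction ks with
  | nil => intro dd x; simp [pvIns]
  | cons k ks ih =>
    intro dd x
    show (pvIns d ks (dd.insert k (d.getD k ""))).get? x = _
    rw [ih]
    by_cases hx : x ∈ ks
    · simp [hx]
    · by_cases hk : x = k
      · subst hk; simp [hx]
      · simp [hx, hk, PySem.Dict.get?_insert]

theorem pv_keys_pvIns (d : PySem.Dict String String) (ks : List String) :
    (pvIns d ks PySem.Dict.empty).keys = PySem.List.dedup ks := by
  show (ks.foldl (fun dd k => dd.insert k ((fun (_ : PySem.Dict String String) k => d.getD k "") dd k)) PySem.Dict.empty).keys = _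
  rw [PySem.Dict.keys_foldl_insert]
  simp [PySem.Dict.keys_empty, PySem.Set.update, PySem.List.dedup, PySem.Set.ofList, PySem.Set.empty]

theorem pv_nodup_keys_pvIns (d : PySem.Dict String String) (ks : List String) :
    (pvIns d ks PySem.Dict.empty).keys.Nodup := by
  exact PySem.Dict.nodup_keys_foldl_insert ks (fun _ k => d.getD k "") PySem.Dict.empty
    (by simp [PySem.Dict.keys_empty])

theorem pv_items_pvIns (d : PySem.Dict String String) (ks : List String) :
    (pvIns d ks PySem.Dict.empty).items = (PySem.List.dedup ks).map (fun k => (k, d.getD k "")) := by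
  rw [PySem.Dict.items_eq_map_keys _ (pv_nodup_keys_pvIns d ks) "", pv_keys_pvIns]
  apply List.map_congr_left
  intro k hk
  have hmem : k ∈ ks := (PySem.List.mem_dedup ks k).mp hk
  have := pv_get?_pvIns d ks PySem.Dict.empty k
  rw [if_pos hmem] at this
  simp [PySem.Dict.getD_eq_get?_getD, this]

-- insertBy congruence, then: sorted2 with pairwise-distinct first keys is sorted by the first key
theorem pv_insertBy_congr (b1 b2 : (String × String) → (String × String) → Bool)
    (x : String × String) : ∀ (ys : List (String × String)),
    (∀ y ∈ ys, b1 x y = b2 x y) → PySem.List.insertBy b1 x ys = PySem.List.insertBy b2 x ys := by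
  intro ys
  induction ys with
  | nil => intro _; rfl
  | cons y ys ih =>
    intro h
    unfold PySem.List.insertBy
    rw [h y (by simp)]
    split
    · rfl
    · rw [ih (fun z hz => h z (by simp [hz]))]

theorem pv_foldl_insertBy_congr (b1 b2 : (String × String) → (String × String) → Bool) :
    ∀ (xs acc : List (String × String)),
      List.Pairwise (fun u w => b1 w u = b2 w u) xs →
      (∀ a ∈ xs, ∀ y ∈ acc, b1 a y = b2 a y) →
      xs.foldl (fun acc x => PySem.List.insertBy b1 x acc) acc
        = xs.foldl (fun acc x => PySem.List.insertBy b2 x acc) acc := by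
  intro xs
  induction xs with
  | nil => intro acc _ _; rfl
  | cons x xs ih =>
    intro acc hp hacc
    have hx : PySem.List.insertBy b1 x acc = PySem.List.insertBy b2 x acc :=
      pv_insertBy_congr b1 b2 x acc (hacc x (by simp))
    simp only [List.foldl_cons, hx]
    apply ih
    · exact hp.of_cons
    · intro a ha y hy
      have : y = x ∨ y ∈ acc := (PySem.List.mem_insertBy (before := b2) (x := x) (ys := acc) (y := y)).mp hy
      rcases this with rfl | hy'
      · exact (List.pairwise_cons.mp hp).1 a ha
      · exact hacc a (by simp [ha]) y hy'

theorem pv_sorted2_eq_sorted_fst (xs : List (String × String))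
    (h : (xs.map Prod.fst).Nodup) :
    PySem.List.sorted2 xs (fun p => p.1) (fun p => p.2) false
      = PySem.List.sorted xs (fun p => p.1) false := by
  have hp : List.Pairwise (fun a b : String × String => a.1 ≠ b.1) xs := by
    rw [List.nodup_iff_pairwise_ne, List.pairwise_map] at h
    exact h
  unfold PySem.List.sorted2 PySem.List.sorted
  simp only [if_neg (by simp : ¬ (false = true))]
  apply pv_foldl_insertBy_congr
  · apply hp.imp
    intro a b hne
    show (decide (b.1 < a.1) || (!decide (a.1 < b.1) && decide (b.2 < a.2))) = decide (b.1 < a.1)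
    by_cases h1 : b.1 < a.1
    · simp [h1, asymm h1]
    · have h2 : a.1 < b.1 := lt_of_le_of_ne (not_lt.mp h1) hne
      simp [h1, h2]
  · intro a _ y hy
    simp at hy

-- a fold of inserts over nodup-first-component pairs keeps the items unchanged
theorem pv_ofList_items (ps : List (String × String)) (h : (ps.map Prod.fst).Nodup) :
    (ps.foldl (fun acc p => acc.insert p.1 p.2) PySem.Dict.empty).items = ps := by
  have := PySem.Dict.items_foldl_insert_fresh ps Prod.fst Prod.snd PySem.Dict.empty
    (by intro a _; simp [PySem.Dict.contains_empty]) h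
  simpa using this

theorem pv_dict_ofList_items (ps : List (String × String)) (h : (ps.map Prod.fst).Nodup) :
    (PySem.Dict.ofList ps).items = ps := by
  show (ps.foldl (fun acc p => acc.insert p.1 p.2) PySem.Dict.empty).items = ps
  exact pv_ofList_items ps h

-- ===== VERDICT (by name: the statement is the Claim_ definition above) =====
theorem get_remains_ips_with_and_without_eips_py_spec : Claim_equal_get_remains_ips_with_and_without_eips_py := by
  intro remain_ips secondary_ips_with_eip _ hpre
  unfold Pre_get_remains_ips_with_and_without_eips_py at hpre
  unfold Spec_get_remains_ips_with_and_without_eips_py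
  unfold get_remains_ips_with_and_without_eips_py get_remains_ips_with_and_without_eips_py_alt
  dsimp only
  set d := PySem.Dict.mk secondary_ips_with_eip with hd
  have hitems : d.items = secondary_ips_with_eip := rfl
  have hkeysnd : d.keys.Nodup := by
    simpa [PySem.Dict.keys, hitems] using hpre
  rw [pv_foldA d remain_ips [] PySem.Dict.empty]
  simp only [List.nil_append]
  set kept := remain_ips.filter (fun ip => d.contains ip) with hkept
  -- shape of A's dict part
  have hAmapnodup : (((PySem.List.dedup kept).map (fun k => (k, d.getD k ""))).map Prod.fst).Nodup := by
    rw [List.map_map]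
    have he : (Prod.fst ∘ fun k : String => (k, d.getD k "")) = fun k => k := rfl
    rw [he, List.map_id']
    exact PySem.List.nodup_dedup kept
  -- shape of B's dict part
  have hsortnd : ((PySem.List.sorted secondary_ips_with_eip (fun p => p.1) false).map Prod.fst).Nodup :=
    ((PySem.List.sorted_perm secondary_ips_with_eip (fun p => p.1) false).map Prod.fst).nodup_iff.mpr hpre
  set S := (PySem.List.sorted secondary_ips_with_eip (fun p => p.1) false).filter
      (fun p => PySem.Set.contains (PySem.Set.ofList remain_ips) p.1) with hS
  have hSnd : (S.map Prod.fst).Nodup := by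
    exact (List.Sublist.map Prod.fst List.filter_sublist).nodup hsortnd
  refine Prod.ext rfl ?_
  dsimp only
  have hLnd : ((PySem.List.sorted ((PySem.List.dedup kept).map (fun k => (k, d.getD k ""))) (fun p => p.1) false).map Prod.fst).Nodup :=
    ((PySem.List.sorted_perm ((PySem.List.dedup kept).map (fun k => (k, d.getD k ""))) (fun p => p.1) false).map Prod.fst).nodup_iff.mpr hAmapnodup
  rw [pv_items_pvIns,
      pv_sorted2_eq_sorted_fst _ hAmapnodup,
      pv_sorted2_eq_sorted_fst _ hpre, ← hS,
      pv_ofList_items S hSnd,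
      pv_dict_ofList_items _ hLnd]
  -- both sides: sorted-by-key list of the pairs {(k, v) ∈ sec | k ∈ remain_ips}
  apply PySem.List.sorted_eq_of_perm_of_pairwise_lt
  · -- S ~ (dedup kept).map fn
    apply (List.perm_ext_iff_of_nodup (hSnd.of_map _) (hAmapnodup.of_map _)).mpr
    intro p
    have hmemS : p ∈ S ↔ p ∈ secondary_ips_with_eip ∧ p.1 ∈ remain_ips := by
      rw [hS, List.mem_filter, PySem.List.mem_sorted]
      constructor
      · rintro ⟨h1, h2⟩
        refine ⟨h1, ?_⟩
        have := PySem.Set.mem_ofList remain_ips p.1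
        simpa [PySem.Set.contains, this] using h2
      · rintro ⟨h1, h2⟩
        refine ⟨h1, ?_⟩
        have := PySem.Set.mem_ofList remain_ips p.1
        simpa [PySem.Set.contains, this] using h2
    rw [hmemS, List.mem_map]
    constructor
    · rintro ⟨hsec, hrem⟩
      rcases p with ⟨k, v⟩
      have hget : d.get? k = some v :=
        (PySem.Dict.get?_eq_some_iff_mem_items d k v hkeysnd).mpr (by simpa [hitems] using hsec)
      have hcont : d.contains k = true := by
        rw [PySem.Dict.contains_eq_isSome_get?, hget]; rfl
      refine ⟨k, ?_, ?_⟩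
      · rw [PySem.List.mem_dedup, hkept, List.mem_filter]
        exact ⟨hrem, by simp [hcont]⟩
      · simp [PySem.Dict.getD_eq_get?_getD, hget]
    · rintro ⟨k, hk, rfl⟩
      rw [PySem.List.mem_dedup, hkept, List.mem_filter] at hk
      obtain ⟨hrem, hcont⟩ := hk
      have hsome : (d.get? k).isSome := by
        rw [← PySem.Dict.contains_eq_isSome_get?]; exact hcont
      obtain ⟨v, hget⟩ := Option.isSome_iff_exists.mp hsome
      have hgetD : d.getD k "" = v := by simp [PySem.Dict.getD_eq_get?_getD, hget]
      refine ⟨?_, hrem⟩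
      have := (PySem.Dict.get?_eq_some_iff_mem_items d k v hkeysnd).mp hget
      simpa [hitems, hgetD] using this
  · -- S is strictly increasing on the key
    have hle : S.Pairwise (fun a b : String × String => a.1 ≤ b.1) :=
      (PySem.List.sorted_pairwise secondary_ips_with_eip (fun p => p.1)).sublist
        List.filter_sublist
    have hne : S.Pairwise (fun a b : String × String => a.1 ≠ b.1) := by
      rw [List.nodup_iff_pairwise_ne, List.pairwise_map] at hSnd
      exact hSnd
    exact (hle.and hne).imp (fun h => lt_of_le_of_ne h.1 h.2)
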